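-- pv_equiv track=rewrite | github.com/lzwjava/lzwjava.github.io | scripts/agent/toc_agent.py | find_existing_toc
-- ===== SOURCE A (Python) =====
-- def find_existing_toc(content):
--     """Find existing TOC in content and return start and end positions."""
--     toc_start = content.find("### Table of Contents")
--     if toc_start == -1:
--         return None, None
--
--     # Find the end of the TOC (next header or end of content)
--     toc_end_patterns = [
--         "\n### ",  # Next level 3 header
--         "\n## ",   # Next level 2 header
--         "\n# ",    # Next level 1 header
--     ]
--
--     toc_end = len(content)  # Default to end of content
--
--     for pattern in toc_end_patterns:
--         pos = content.find(pattern, toc_start)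
--         if pos != -1 and pos < toc_end:
--             toc_end = pos
--
--     return toc_start, toc_end
-- ===== SOURCE B (Python) =====
-- def find_existing_toc(content):
--     """Find existing TOC in content and return start and end positions."""
--     toc_start = content.find("### Table of Contents")
--     if toc_start == -1:
--         return None, None
--     toc_end = len(content)
--     for i in range(toc_start, len(content)):
--         if content.startswith(("\n# ", "\n## ", "\n### "), i):
--             toc_end = i
--             break
--     return toc_start, toc_end
-- ===== Notes on version B (the rewrite author's own statement) =====
-- stated objective: alternative
-- what changed: Replaced A's three repeated find scans plus a running minimum with a single left-to-right scan from toc_start that stops at the first position where any of the three header patterns starts.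
import Mathlib
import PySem

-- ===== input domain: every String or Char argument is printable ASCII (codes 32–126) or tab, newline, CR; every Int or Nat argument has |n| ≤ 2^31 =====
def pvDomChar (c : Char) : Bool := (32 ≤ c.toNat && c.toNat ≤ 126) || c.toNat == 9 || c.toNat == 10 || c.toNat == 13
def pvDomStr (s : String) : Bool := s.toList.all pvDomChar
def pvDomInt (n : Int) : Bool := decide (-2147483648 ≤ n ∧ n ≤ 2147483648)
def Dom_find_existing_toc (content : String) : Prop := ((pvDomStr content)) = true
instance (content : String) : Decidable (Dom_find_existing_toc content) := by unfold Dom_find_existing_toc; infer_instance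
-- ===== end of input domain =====

-- B replaces A's three repeated find scans plus running minimum by a single left-to-right
-- scan from toc_start that stops at the first following header (alternative decomposition).

-- ===== PORT A =====
def find_existing_toc (content : String) : Option Int × Option Int :=
  let toc_start := PySem.Str.find content "### Table of Contents"
  if toc_start = -1 then (none, none)
  else
    let toc_end := [("\n### " : String), "\n## ", "\n# "].foldl
      (fun toc_end pattern =>
        let pos := PySem.Str.findFrom content pattern toc_start none
        if pos ≠ -1 ∧ pos < toc_end then pos else toc_end)
      (PySem.Str.len content)
    (some toc_start, some toc_end)

-- ===== PORT B =====
-- content.startswith(("\n# ", "\n## ", "\n### "), i)  tested on the suffix content[i:]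
def pvHit (l : List Char) : Bool :=
  "\n# ".toList.isPrefixOf l || "\n## ".toList.isPrefixOf l || "\n### ".toList.isPrefixOf l

-- the single scan: 'for i in range(toc_start, len(content)): if … : toc_end = i; break'
def pvScan : List Char → Int → Option Int
  | [], _ => none
  | a :: t, i => if pvHit (a :: t) then some i else pvScan t (i + 1)

def find_existing_toc_alt (content : String) : Option Int × Option Int :=
  let s := content.toList
  let toc_start := PySem.Chars.find s "### Table of Contents".toList
  if toc_start = -1 then (none, none)
  else
    let toc_end := (pvScan (s.drop toc_start.toNat) toc_start).getD (s.length : Int)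
    (some toc_start, some toc_end)

-- ===== PRECONDITION & SPEC =====
def Spec_find_existing_toc (content : String) (out : Option Int × Option Int) : Prop := out = find_existing_toc_alt content
instance (content : String) (out : Option Int × Option Int) : Decidable (Spec_find_existing_toc content out) := by unfold Spec_find_existing_toc; infer_instance

-- ===== CLAIM (what is proved, stated in full; the proofs are below) =====
def Claim_equal_find_existing_toc : Prop := ∀ (content : String), Dom_find_existing_toc content → Spec_find_existing_toc content (find_existing_toc content)

-- ===== LEMMAS AND PROOFS =====

lemma pvHit_iff (l : List Char) :
    pvHit l = true ↔ (['\n', '#', ' '] <+: l ∨ ['\n', '#', '#', ' '] <+: l ∨ ['\n', '#', '#', '#', ' '] <+: l) := by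
  simp [pvHit, List.isPrefixOf_iff_prefix, or_assoc]

-- pvScan on the suffix s.drop k, with counter k, finds the least index ≥ k at which pvHit holds
lemma pvScan_spec (s : List Char) : ∀ (m k : Nat), s.length - k ≤ m →
    (pvScan (s.drop k) (k : Int) = none → ∀ i : Nat, k ≤ i → pvHit (s.drop i) = false) ∧
    (∀ j : Int, pvScan (s.drop k) (k : Int) = some j →
      ∃ jn : Nat, j = (jn : Int) ∧ k ≤ jn ∧ pvHit (s.drop jn) = true ∧
        ∀ i : Nat, k ≤ i → i < jn → pvHit (s.drop i) = false) := by
  intro m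
  induction m with
  | zero =>
    intro k hm
    have hnil : s.drop k = [] := by
      apply List.drop_eq_nil_of_le; omega
    rw [hnil]
    constructor
    · intro _ i hi
      have : s.drop i = [] := by apply List.drop_eq_nil_of_le; omega
      rw [this]; decide
    · intro j hj; simp [pvScan] at hj
  | succ m ih =>
    intro k hm
    cases hdk : s.drop k with
    | nil =>
      constructor
      · intro _ i hi
        have hk : s.length ≤ k := by
          by_contra hlt
          have := List.length_drop (l := s) (i := k)
          rw [hdk] at this; simp at this; omega
        have : s.drop i = [] := by apply List.drop_eq_nil_of_le; omega
        rw [this]; decide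
      · intro j hj; simp [pvScan] at hj
    | cons a t =>
      have hklt : k < s.length := by
        by_contra hle
        have : s.drop k = [] := by apply List.drop_eq_nil_of_le; omega
        rw [this] at hdk; simp at hdk
      have hdk1 : s.drop (k + 1) = t := by
        have : s.drop (k + 1) = (s.drop k).drop 1 := by
          rw [List.drop_drop]
        rw [this, hdk]; rfl
      have ih' := ih (k + 1) (by omega)
      rw [hdk1] at ih'
      by_cases hhit : pvHit (a :: t) = true
      · constructor
        · intro hnone
          simp [pvScan, hhit] at hnone
        · intro j hj
          simp [pvScan, hhit] at hj
          exact ⟨k, by omega, le_refl _, by rw [hdk]; exact hhit, fun i h1 h2 => absurd h1 (by omega)⟩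
      · have hhit' : pvHit (a :: t) = false := by
          cases h : pvHit (a :: t) with
          | true => exact absurd h hhit
          | false => rfl
        have hstep : pvScan (a :: t) (k : Int) = pvScan t ((k : Int) + 1) := by
          simp [pvScan, hhit']
        have hcast : ((k : Int) + 1) = ((k + 1 : Nat) : Int) := by push_cast; ring
        rw [hstep, hcast]
        constructor
        · intro hnone i hi
          rcases Nat.eq_or_lt_of_le hi with rfl | hlt
          · rw [hdk]; exact hhit'
          · exact ih'.1 hnone i (by omega)
        · intro j hj
          obtain ⟨jn, hje, hkj, hhj, hmin⟩ := ih'.2 j hj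
          refine ⟨jn, hje, by omega, hhj, ?_⟩
          intro i h1 h2
          rcases Nat.eq_or_lt_of_le h1 with rfl | hlt
          · rw [hdk]; exact hhit'
          · exact hmin i (by omega) h2

-- the three-step running minimum of A, abstracted
lemma pvFold3_min (n r1 r2 r3 j : Int)
    (h1 : r1 = -1 ∨ j ≤ r1) (h2 : r2 = -1 ∨ j ≤ r2) (h3 : r3 = -1 ∨ j ≤ r3)
    (hex : r1 = j ∨ r2 = j ∨ r3 = j) (hj0 : 0 ≤ j) (hjn : j < n) :
    (if r3 ≠ -1 ∧ r3 < (if r2 ≠ -1 ∧ r2 < (if r1 ≠ -1 ∧ r1 < n then r1 else n)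
        then r2 else (if r1 ≠ -1 ∧ r1 < n then r1 else n))
      then r3 else (if r2 ≠ -1 ∧ r2 < (if r1 ≠ -1 ∧ r1 < n then r1 else n)
        then r2 else (if r1 ≠ -1 ∧ r1 < n then r1 else n))) = j := by
  split_ifs <;> omega

-- findFrom at ↑k characterised: -1 means no occurrence at any i ≥ k
lemma pvFindFrom_eq_neg_one_iff (s p : List Char) (k : Nat) (hk : k ≤ s.length) :
    PySem.Chars.findFrom s p (k : Int) none = -1 ↔ ∀ i : Nat, k ≤ i → ¬ p <+: s.drop i := by
  rw [PySem.Chars.findFrom_natCast_eq_neg_one_iff s p k hk]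
  rw [← PySem.Chars.isIn_iff_infix, ← PySem.Chars.exists_prefix_drop_iff_isIn]
  constructor
  · intro h i hi hp
    exact h ⟨i - k, by rw [List.drop_drop, Nat.add_sub_cancel' hi]; exact hp⟩
  · rintro h ⟨jj, hp⟩
    rw [List.drop_drop] at hp
    exact h (k + jj) (by omega) hp

-- ===== VERDICT (by name: the statement is the Claim_ definition above) =====
theorem find_existing_toc_spec : Claim_equal_find_existing_toc := by
  intro content _
  unfold Spec_find_existing_toc find_existing_toc find_existing_toc_alt
  simp only [PySem.Str.find_eq, PySem.Str.findFrom_eq, PySem.Str.len_eq]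
  set s := content.toList with hs
  set ts := PySem.Chars.find s "### Table of Contents".toList with hts
  by_cases h0 : ts = -1
  · simp [h0]
  · simp only [h0, if_false]
    have hts0 : 0 ≤ ts := by
      rw [PySem.Chars.find_nonneg_iff, ← PySem.Chars.find_ne_neg_one_iff]
      exact h0
    have hkk : ts = ((ts.toNat : Nat) : Int) := by omega
    set k := ts.toNat with hkdef
    have hkle : k ≤ s.length := by
      have := PySem.Chars.find_le_length s "### Table of Contents".toList
      omega
    refine Prod.ext rfl ?_
    simp only [List.foldl_cons, List.foldl_nil]
    rw [show ("\n### " : String).toList = ['\n', '#', '#', '#', ' '] from rfl,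
        show ("\n## " : String).toList = ['\n', '#', '#', ' '] from rfl,
        show ("\n# " : String).toList = ['\n', '#', ' '] from rfl]
    rw [hkk]
    refine congrArg some ?_
    have hspec := pvScan_spec s (s.length - k) k (le_refl _)
    cases hscan : pvScan (s.drop k) (k : Int) with
    | none =>
      have hnone := hspec.1 hscan
      have hgen : ∀ (p : List Char), (∀ l, p <+: l → pvHit l = true) →
          PySem.Chars.findFrom s p (k : Int) none = -1 := by
        intro p himp
        apply (pvFindFrom_eq_neg_one_iff s p k hkle).2
        intro i hi hp
        have ht := himp _ hp
        rw [hnone i hi] at ht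
        exact Bool.noConfusion ht
      have h1 := hgen ['\n', '#', '#', '#', ' '] (fun l h => (pvHit_iff l).2 (by tauto))
      have h2 := hgen ['\n', '#', '#', ' '] (fun l h => (pvHit_iff l).2 (by tauto))
      have h3 := hgen ['\n', '#', ' '] (fun l h => (pvHit_iff l).2 (by tauto))
      simp [h1, h2, h3]
    | some j =>
      obtain ⟨jn, rfl, hkj, hhj, hmin⟩ := hspec.2 j hscan
      have hnob : ∀ (p : List Char), (∀ l, p <+: l → pvHit l = true) →
          ∀ i : Nat, k ≤ i → i < jn → ¬ p <+: s.drop i := by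
        intro p himp i h1 h2 hp
        have ht := himp _ hp
        rw [hmin i h1 h2] at ht
        exact Bool.noConfusion ht
      have himp1 : ∀ l, ['\n', '#', '#', '#', ' '] <+: l → pvHit l = true := by
        intro l h; rw [pvHit_iff]; tauto
      have himp2 : ∀ l, ['\n', '#', '#', ' '] <+: l → pvHit l = true := by
        intro l h; rw [pvHit_iff]; tauto
      have himp3 : ∀ l, ['\n', '#', ' '] <+: l → pvHit l = true := by
        intro l h; rw [pvHit_iff]; tauto
      have hchar : ∀ (p : List Char), (∀ l, p <+: l → pvHit l = true) →
          (PySem.Chars.findFrom s p (k : Int) none = -1 ∨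
            ((jn : Int) ≤ PySem.Chars.findFrom s p (k : Int) none)) ∧
          (p <+: s.drop jn → PySem.Chars.findFrom s p (k : Int) none = (jn : Int)) := by
        intro p himp
        by_cases hne : PySem.Chars.findFrom s p (k : Int) none = -1
        · refine ⟨Or.inl hne, fun hp => absurd hp ?_⟩
          exact (pvFindFrom_eq_neg_one_iff s p k hkle).1 hne jn hkj
        · obtain ⟨hge, hpref, hm⟩ := PySem.Chars.findFrom_natCast_spec s p k hkle hne
          set r := PySem.Chars.findFrom s p (k : Int) none with hr
          have hr0 : 0 ≤ r := le_trans (by omega) hge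
          have hge' : (jn : Int) ≤ r := by
            by_contra hlt
            exact hnob p himp r.toNat (by omega) (by omega) hpref
          refine ⟨Or.inr hge', fun hp => ?_⟩
          have : ¬ ((jn : Nat) < r.toNat) := fun hgt => hm jn hkj hgt hp
          omega
      have hc1 := hchar ['\n', '#', '#', '#', ' '] himp1
      have hc2 := hchar ['\n', '#', '#', ' '] himp2
      have hc3 := hchar ['\n', '#', ' '] himp3
      have hjn_lt : jn < s.length := by
        by_contra hge
        have hd : s.drop jn = [] := by apply List.drop_eq_nil_of_le; omega
        rw [hd] at hhj
        exact absurd hhj (by decide)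
      have hex : PySem.Chars.findFrom s ['\n', '#', '#', '#', ' '] (k : Int) none = (jn : Int) ∨
          PySem.Chars.findFrom s ['\n', '#', '#', ' '] (k : Int) none = (jn : Int) ∨
          PySem.Chars.findFrom s ['\n', '#', ' '] (k : Int) none = (jn : Int) := by
        rw [pvHit_iff] at hhj
        rcases hhj with h | h | h
        · exact Or.inr (Or.inr (hc3.2 h))
        · exact Or.inr (Or.inl (hc2.2 h))
        · exact Or.inl (hc1.2 h)
      simp only [Option.getD_some]
      exact pvFold3_min (s.length : Int) _ _ _ (jn : Int) hc1.1 hc2.1 hc3.1 hex (by omega) (by omega)
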